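-- pv_equiv track=rewrite | github.com/hjstephan/subgraph | src/subgraph.py | _compare_signature_sequences
-- ===== SOURCE A (Python) =====
-- from typing import List, Tuple, Set
--
-- def _compare_signature_sequences(seq_A: List[int], seq_B: List[int]) -> bool:
--     """
--     Vergleicht zwei Signatur-Sequenzen elementweise.
--     Args:
--         seq_A: Signatur-Sequenz von G
--         seq_B: Signatur-Sequenz von G'
--     """
--     n, m = len(seq_A), len(seq_B)
--
--     dp = [[0] * (m + 1) for _ in range(n + 1)]
--     max_length = 0
--
--     for i in range(1, n + 1):
--         for j in range(1, m + 1):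
--             if seq_A[i-1] == seq_B[j-1]:
--                 dp[i][j] = dp[i-1][j-1] + 1
--                 max_length = max(max_length, dp[i][j])
--             else:
--                 dp[i][j] = 0
--
--     return max_length >= 2
-- ===== SOURCE B (Python) =====
-- def _compare_signature_sequences(seq_A, seq_B):
--     pairs = set(zip(seq_A, seq_A[1:]))
--     return any(p in pairs for p in zip(seq_B, seq_B[1:]))
-- ===== Notes on version B (the rewrite author's own statement) =====
-- stated objective: faster
-- what changed: Replaced the O(n*m) longest-common-substring DP table (checked against 2) by hashing seq_A's adjacent pairs into a set and scanning seq_B's adjacent pairs for a hit, since max_length >= 2 holds iff some adjacent pair is common.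
import Mathlib
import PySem

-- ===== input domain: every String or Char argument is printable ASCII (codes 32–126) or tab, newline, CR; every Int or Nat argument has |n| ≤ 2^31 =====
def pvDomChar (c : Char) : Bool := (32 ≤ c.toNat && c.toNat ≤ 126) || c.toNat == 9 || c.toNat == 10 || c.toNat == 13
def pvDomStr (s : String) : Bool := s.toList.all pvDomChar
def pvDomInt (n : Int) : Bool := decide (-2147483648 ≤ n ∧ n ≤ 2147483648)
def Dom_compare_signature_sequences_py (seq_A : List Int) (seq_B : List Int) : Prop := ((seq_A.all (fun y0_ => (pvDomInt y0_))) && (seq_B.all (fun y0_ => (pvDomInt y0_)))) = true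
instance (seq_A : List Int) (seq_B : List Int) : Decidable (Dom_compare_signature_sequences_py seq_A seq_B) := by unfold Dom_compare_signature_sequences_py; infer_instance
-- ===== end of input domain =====

-- B replaces A's O(n*m) longest-common-substring DP (checked against 2) by a set of seq_A's
-- adjacent pairs scanned against seq_B's adjacent pairs (objective: faster).

-- ===== PORT A =====
-- The dp table (list of lists; every cell write/read uses in-range indices) is modelled as a
-- zero-initialised function Int → Int → Int, 'dp[i][j] = v' as a pointwise update — exact here.
-- seq_A[i-1] / seq_B[j-1] are always in range; ported with pyGetD (exact there).
def pvDpStep (seq_A : List Int) (seq_B : List Int) (i : Int)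
    (st : (Int → Int → Int) × Int) (j : Int) : (Int → Int → Int) × Int :=
  let dp := st.1
  if PySem.List.pyGetD seq_A (i-1) 0 = PySem.List.pyGetD seq_B (j-1) 0 then
    let v := dp (i-1) (j-1) + 1
    (fun i' j' => if i' = i ∧ j' = j then v else dp i' j', max st.2 v)
  else
    (fun i' j' => if i' = i ∧ j' = j then 0 else dp i' j', st.2)

def pvDpRow (seq_A : List Int) (seq_B : List Int)
    (st : (Int → Int → Int) × Int) (i : Int) : (Int → Int → Int) × Int :=
  (PySem.List.pyRange 1 ((seq_B.length : Int) + 1) 1).foldl (pvDpStep seq_A seq_B i) st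

def compare_signature_sequences_py (seq_A : List Int) (seq_B : List Int) : Bool :=
  let st := (PySem.List.pyRange 1 ((seq_A.length : Int) + 1) 1).foldl
      (pvDpRow seq_A seq_B) ((fun _ _ => 0), 0)
  decide (2 ≤ st.2)

-- ===== PORT B =====
def compare_signature_sequences_py_alt (seq_A : List Int) (seq_B : List Int) : Bool :=
  let pairs : PySem.Set (Int × Int) :=
    PySem.Set.ofList (seq_A.zip (PySem.List.slice seq_A (some 1) none))
  (seq_B.zip (PySem.List.slice seq_B (some 1) none)).any (fun p => PySem.Set.contains pairs p)

-- ===== PRECONDITION & SPEC =====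
def Spec_compare_signature_sequences_py (seq_A : List Int) (seq_B : List Int) (out : Bool) : Prop := out = compare_signature_sequences_py_alt seq_A seq_B
instance (seq_A : List Int) (seq_B : List Int) (out : Bool) : Decidable (Spec_compare_signature_sequences_py seq_A seq_B out) := by unfold Spec_compare_signature_sequences_py; infer_instance

-- ===== CLAIM (what is proved, stated in full; the proofs are below) =====
def Claim_equal_compare_signature_sequences_py : Prop := ∀ (seq_A : List Int) (seq_B : List Int), Dom_compare_signature_sequences_py seq_A seq_B → Spec_compare_signature_sequences_py seq_A seq_B (compare_signature_sequences_py seq_A seq_B)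

-- ===== LEMMAS AND PROOFS =====

-- Length of the longest common suffix of seq_A[:i] and seq_B[:j] (the value dp[i][j] holds).
def Lsuf (a : List Int) (b : List Int) : Nat → Nat → Int
  | 0, _ => 0
  | _+1, 0 => 0
  | i+1, j+1 => if a.getD i 0 = b.getD j 0 then Lsuf a b i j + 1 else 0

lemma Lsuf_nonneg (a b : List Int) : ∀ i j, 0 ≤ Lsuf a b i j := by
  intro i
  induction i with
  | zero => intro j; simp [Lsuf]
  | succ i ih =>
    intro j
    cases j with
    | zero => simp [Lsuf]
    | succ j =>
      simp only [Lsuf]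
      split
      · have := ih j; omega
      · omega

lemma one_le_Lsuf (a b : List Int) (i j : Nat) :
    1 ≤ Lsuf a b (i+1) (j+1) ↔ a.getD i 0 = b.getD j 0 := by
  simp only [Lsuf]
  split
  · rename_i hEq
    have := Lsuf_nonneg a b i j
    exact ⟨fun _ => hEq, fun _ => by omega⟩
  · rename_i hNe
    exact ⟨fun h => by omega, fun h => absurd h hNe⟩

lemma two_le_Lsuf (a b : List Int) : ∀ i j : Nat,
    2 ≤ Lsuf a b i j ↔ ∃ i' j' : Nat, i = i' + 2 ∧ j = j' + 2 ∧
      a.getD (i'+1) 0 = b.getD (j'+1) 0 ∧ a.getD i' 0 = b.getD j' 0 := by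
  intro i j
  match i, j with
  | 0, _ => simp [Lsuf]
  | _+1, 0 => simp [Lsuf]
  | 1, j+1 =>
    rw [show Lsuf a b 1 (j+1) = (if a.getD 0 0 = b.getD j 0 then Lsuf a b 0 j + 1 else 0) from rfl]
    constructor
    · intro h
      have h0 : Lsuf a b 0 j = 0 := rfl
      exfalso; split at h <;> omega
    · rintro ⟨i', j', h, _⟩; omega
  | i+2, 1 =>
    rw [show Lsuf a b (i+2) 1 = (if a.getD (i+1) 0 = b.getD 0 0 then Lsuf a b (i+1) 0 + 1 else 0) from rfl]
    constructor
    · intro h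
      have h0 : Lsuf a b (i+1) 0 = 0 := rfl
      exfalso; split at h <;> omega
    · rintro ⟨i', j', _, h, _⟩; omega
  | i+2, j+2 =>
    rw [show Lsuf a b (i+2) (j+2) = (if a.getD (i+1) 0 = b.getD (j+1) 0 then Lsuf a b (i+1) (j+1) + 1 else 0) from rfl]
    split
    · rename_i hEq
      have h1 := one_le_Lsuf a b i j
      constructor
      · intro h
        exact ⟨i, j, rfl, rfl, hEq, h1.mp (by omega)⟩
      · rintro ⟨i', j', hi, hj, _, h2⟩
        have hij : i' = i ∧ j' = j := by omega
        obtain ⟨rfl, rfl⟩ := hij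
        have := h1.mpr h2; omega
    · rename_i hNe
      constructor
      · intro h; omega
      · rintro ⟨i', j', hi, hj, h1, _⟩
        have hij : i' = i ∧ j' = j := by omega
        obtain ⟨rfl, rfl⟩ := hij
        exact absurd h1 hNe

-- Loop invariant: rows 1..i-1 fully processed, row i processed up to column j.
def DpInv (a b : List Int) (i j : Nat) (dp : Int → Int → Int) (ml : Int) : Prop :=
  (∀ i' j' : Nat, dp (i' : Int) (j' : Int) =
      if 1 ≤ i' ∧ 1 ≤ j' ∧ j' ≤ b.length ∧ (i' < i ∨ (i' = i ∧ j' ≤ j))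
      then Lsuf a b i' j' else 0)
  ∧ 0 ≤ ml
  ∧ (2 ≤ ml ↔ ∃ i' j' : Nat, 1 ≤ i' ∧ 1 ≤ j' ∧ j' ≤ b.length ∧
      (i' < i ∨ (i' = i ∧ j' ≤ j)) ∧ 2 ≤ Lsuf a b i' j')

lemma step_inv (a b : List Int) (ic j : Nat) (dp : Int → Int → Int) (ml : Int)
    (h1 : 1 ≤ ic) (hi : ic ≤ a.length) (hj : j < b.length)
    (h : DpInv a b ic j dp ml) :
    DpInv a b ic (j+1) (pvDpStep a b (ic : Int) (dp, ml) (1 + (j : Int))).1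
      (pvDpStep a b (ic : Int) (dp, ml) (1 + (j : Int))).2 := by
  obtain ⟨hdp, hml0, hml⟩ := h
  obtain ⟨ip, rfl⟩ : ∃ ip, ic = ip + 1 := ⟨ic - 1, by omega⟩
  have hai : PySem.List.pyGetD a (((ip+1 : Nat) : Int) - 1) 0 = a.getD ip 0 := by
    rw [show (((ip+1 : Nat) : Int) - 1) = ((ip : Nat) : Int) by push_cast; ring]
    rw [PySem.List.pyGetD_of_nonneg a 0 (Int.natCast_nonneg _)]
    simp
  have hbj : PySem.List.pyGetD b (1 + (j : Int) - 1) 0 = b.getD j 0 := by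
    rw [show (1 + (j : Int) - 1) = ((j : Nat) : Int) by ring]
    rw [PySem.List.pyGetD_of_nonneg b 0 (Int.natCast_nonneg _)]
    simp
  have hdiag : dp (((ip+1 : Nat) : Int) - 1) (1 + (j : Int) - 1) = Lsuf a b ip j := by
    rw [show (((ip+1 : Nat) : Int) - 1) = ((ip : Nat) : Int) by push_cast; ring,
        show (1 + (j : Int) - 1) = ((j : Nat) : Int) by ring, hdp ip j]
    by_cases hc : 1 ≤ ip ∧ 1 ≤ j
    · rw [if_pos ⟨hc.1, hc.2, by omega, by omega⟩]
    · rw [if_neg (by omega)]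
      rcases Nat.eq_zero_or_pos ip with rfl | hip
      · simp [Lsuf]
      · have hj0 : j = 0 := by omega
        subst hj0
        cases ip <;> simp [Lsuf]
  have hcond : ∀ i' j' : Nat,
      ((i' : Int) = ((ip+1 : Nat) : Int) ∧ (j' : Int) = 1 + (j : Int)) ↔
      (i' = ip + 1 ∧ j' = j + 1) := by
    intro i' j'
    constructor
    · rintro ⟨u1, u2⟩; constructor <;> omega
    · rintro ⟨rfl, rfl⟩; constructor <;> push_cast <;> ring
  have hLnew : Lsuf a b (ip+1) (j+1) =
      if a.getD ip 0 = b.getD j 0 then Lsuf a b ip j + 1 else 0 := rfl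
  by_cases hg : a.getD ip 0 = b.getD j 0
  · have hstep : pvDpStep a b ((ip+1 : Nat) : Int) (dp, ml) (1 + (j : Int)) =
        (fun i' j' => if i' = ((ip+1 : Nat) : Int) ∧ j' = 1 + (j : Int)
            then dp (((ip+1 : Nat) : Int) - 1) (1 + (j : Int) - 1) + 1 else dp i' j',
         max ml (dp (((ip+1 : Nat) : Int) - 1) (1 + (j : Int) - 1) + 1)) := by
      simp only [pvDpStep, hai, hbj, if_pos hg]
    rw [hstep]
    refine ⟨?_, ?_, ?_⟩
    · intro i' j'
      simp only
      by_cases hc : i' = ip + 1 ∧ j' = j + 1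
      · rw [if_pos ((hcond i' j').mpr hc)]
        obtain ⟨rfl, rfl⟩ := hc
        rw [if_pos (by omega), hdiag, hLnew, if_pos hg]
      · rw [if_neg (fun hx => hc ((hcond i' j').mp hx)), hdp i' j']
        exact if_congr (by constructor <;> (rintro ⟨u1, u2, u3, u4⟩; exact ⟨u1, u2, u3, by omega⟩)) rfl rfl
    · simp only
      exact le_trans hml0 (le_max_left _ _)
    · simp only [hdiag]
      have h2 : 2 ≤ max ml (Lsuf a b ip j + 1) ↔ 2 ≤ ml ∨ 2 ≤ Lsuf a b (ip+1) (j+1) := by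
        rw [hLnew, if_pos hg]; exact le_max_iff
      rw [h2, hml]
      constructor
      · rintro (⟨i', j', u1, u2, u3, u4, u5⟩ | h2')
        · exact ⟨i', j', u1, u2, u3, by omega, u5⟩
        · exact ⟨ip+1, j+1, by omega, by omega, by omega, by omega, h2'⟩
      · rintro ⟨i', j', u1, u2, u3, u4, u5⟩
        by_cases hc : i' = ip + 1 ∧ j' = j + 1
        · right; obtain ⟨rfl, rfl⟩ := hc; exact u5
        · left; exact ⟨i', j', u1, u2, u3, by omega, u5⟩
  · have hstep : pvDpStep a b ((ip+1 : Nat) : Int) (dp, ml) (1 + (j : Int)) =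
        (fun i' j' => if i' = ((ip+1 : Nat) : Int) ∧ j' = 1 + (j : Int)
            then 0 else dp i' j', ml) := by
      simp only [pvDpStep, hai, hbj, if_neg hg]
    rw [hstep]
    refine ⟨?_, hml0, ?_⟩
    · intro i' j'
      simp only
      by_cases hc : i' = ip + 1 ∧ j' = j + 1
      · rw [if_pos ((hcond i' j').mpr hc)]
        obtain ⟨rfl, rfl⟩ := hc
        rw [if_pos (by omega), hLnew, if_neg hg]
      · rw [if_neg (fun hx => hc ((hcond i' j').mp hx)), hdp i' j']
        exact if_congr (by constructor <;> (rintro ⟨u1, u2, u3, u4⟩; exact ⟨u1, u2, u3, by omega⟩)) rfl rfl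
    · rw [hml]
      have hz : ¬ (2 ≤ Lsuf a b (ip+1) (j+1)) := by rw [hLnew, if_neg hg]; omega
      constructor
      · rintro ⟨i', j', u1, u2, u3, u4, u5⟩; exact ⟨i', j', u1, u2, u3, by omega, u5⟩
      · rintro ⟨i', j', u1, u2, u3, u4, u5⟩
        by_cases hc : i' = ip + 1 ∧ j' = j + 1
        · obtain ⟨rfl, rfl⟩ := hc; exact absurd u5 hz
        · exact ⟨i', j', u1, u2, u3, by omega, u5⟩

lemma row_inv (a b : List Int) (ic : Nat) (h1 : 1 ≤ ic) (hi : ic ≤ a.length) :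
    ∀ (t j0 : Nat) (st : (Int → Int → Int) × Int), j0 + t = b.length →
    DpInv a b ic j0 st.1 st.2 →
    DpInv a b ic b.length
      (((List.range' j0 t).foldl (fun s (k : Nat) => pvDpStep a b (ic : Int) s (1 + (k : Int))) st).1)
      (((List.range' j0 t).foldl (fun s (k : Nat) => pvDpStep a b (ic : Int) s (1 + (k : Int))) st).2) := by
  intro t
  induction t with
  | zero =>
    intro j0 st h0 hDpI
    obtain rfl : j0 = b.length := by omega
    simpa using hDpI
  | succ t ih =>
    intro j0 st h0 hDpI
    rw [List.range'_succ]
    simp only [List.foldl_cons]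
    exact ih (j0+1) _ (by omega) (step_inv a b ic j0 st.1 st.2 h1 hi (by omega) hDpI)

lemma inv_shift (a b : List Int) (r : Nat) (dp : Int → Int → Int) (ml : Int)
    (h : DpInv a b r b.length dp ml) : DpInv a b (r+1) 0 dp ml := by
  obtain ⟨hdp, hml0, hml⟩ := h
  refine ⟨?_, hml0, ?_⟩
  · intro i' j'
    rw [hdp i' j']
    exact if_congr (by constructor <;> (rintro ⟨u1, u2, u3, u4⟩; exact ⟨u1, u2, u3, by omega⟩)) rfl rfl
  · rw [hml]
    constructor <;> (rintro ⟨i', j', u1, u2, u3, u4, u5⟩; exact ⟨i', j', u1, u2, u3, by omega, u5⟩)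

lemma row_run (a b : List Int) (ic : Nat) (h1 : 1 ≤ ic) (hi : ic ≤ a.length)
    (st : (Int → Int → Int) × Int) (hDpI : DpInv a b ic 0 st.1 st.2) :
    DpInv a b ic b.length (pvDpRow a b st (ic : Int)).1 (pvDpRow a b st (ic : Int)).2 := by
  unfold pvDpRow
  rw [PySem.List.pyRange_one]
  have hlen : ((b.length : Int) + 1 - 1).toNat = b.length := by omega
  rw [hlen, List.foldl_map, List.range_eq_range']
  exact row_inv a b ic h1 hi b.length 0 st (by omega) hDpI

lemma outer_inv (a b : List Int) : ∀ (t r0 : Nat) (st : (Int → Int → Int) × Int),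
    r0 + t = a.length → DpInv a b r0 b.length st.1 st.2 →
    DpInv a b a.length b.length
      (((List.range' r0 t).foldl (fun s (k : Nat) => pvDpRow a b s (1 + (k : Int))) st).1)
      (((List.range' r0 t).foldl (fun s (k : Nat) => pvDpRow a b s (1 + (k : Int))) st).2) := by
  intro t
  induction t with
  | zero =>
    intro r0 st h0 hDpI
    obtain rfl : r0 = a.length := by omega
    simpa using hDpI
  | succ t ih =>
    intro r0 st h0 hDpI
    rw [List.range'_succ]
    simp only [List.foldl_cons]
    have hcast : (1 + (r0 : Int)) = ((r0 + 1 : Nat) : Int) := by push_cast; ring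
    rw [hcast]
    exact ih (r0+1) _ (by omega)
      (row_run a b (r0+1) (by omega) (by omega) st (inv_shift a b r0 st.1 st.2 hDpI))

lemma A_char (a b : List Int) : compare_signature_sequences_py a b = true ↔
    ∃ i' j' : Nat, 1 ≤ i' ∧ 1 ≤ j' ∧ i' ≤ a.length ∧ j' ≤ b.length ∧ 2 ≤ Lsuf a b i' j' := by
  unfold compare_signature_sequences_py
  rw [PySem.List.pyRange_one]
  have hlen : ((a.length : Int) + 1 - 1).toNat = a.length := by omega
  rw [hlen, List.foldl_map, List.range_eq_range']
  have h0 : DpInv a b 0 b.length (fun _ _ => 0) 0 := by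
    refine ⟨fun i' j' => by rw [if_neg (by omega)], le_refl 0, ?_⟩
    constructor
    · omega
    · rintro ⟨i', j', u1, u2, u3, u4, u5⟩; omega
  have hF := outer_inv a b a.length 0 ((fun _ _ => 0), 0) (by omega) h0
  obtain ⟨-, -, hml⟩ := hF
  simp only [decide_eq_true_eq]
  rw [hml]
  constructor <;> (rintro ⟨i', j', u1, u2, u3, u4, u5⟩)
  · exact ⟨i', j', u1, u2, by omega, u3, u5⟩
  · exact ⟨i', j', u1, u2, u4, by omega, u5⟩

lemma mem_zip_tail (xs : List Int) (p : Int × Int) :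
    p ∈ xs.zip xs.tail ↔
      ∃ k, k + 1 < xs.length ∧ xs.getD k 0 = p.1 ∧ xs.getD (k+1) 0 = p.2 := by
  rw [List.mem_iff_getElem]
  constructor
  · rintro ⟨k, hk, hEq⟩
    have hlen : k + 1 < xs.length := by
      simp only [List.length_zip, List.length_tail] at hk; omega
    refine ⟨k, hlen, ?_, ?_⟩
    · rw [List.getD_eq_getElem xs 0 (by omega)]
      rw [List.getElem_zip] at hEq
      rw [← hEq]
    · rw [List.getD_eq_getElem xs 0 (by omega)]
      rw [List.getElem_zip] at hEq
      rw [← hEq]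
      simp [List.getElem_tail]
  · rintro ⟨k, hlen, h1, h2⟩
    refine ⟨k, by simp only [List.length_zip, List.length_tail]; omega, ?_⟩
    rw [List.getElem_zip]
    have e1 : xs[k] = p.1 := by rw [← h1, List.getD_eq_getElem xs 0 (by omega)]
    have e2 : xs.tail[k]'(by simp [List.length_tail]; omega) = p.2 := by
      rw [List.getElem_tail, ← h2, List.getD_eq_getElem xs 0 (by omega)]
    rw [e1, e2]

lemma B_char (a b : List Int) : compare_signature_sequences_py_alt a b = true ↔
    ∃ p : Int × Int, p ∈ b.zip b.tail ∧ p ∈ a.zip a.tail := by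
  unfold compare_signature_sequences_py_alt
  rw [PySem.List.slice_from_one, PySem.List.slice_from_one]
  rw [List.any_eq_true]
  constructor
  · rintro ⟨p, hp, hc⟩
    rw [PySem.Set.contains_iff, PySem.Set.mem_ofList] at hc
    exact ⟨p, hp, hc⟩
  · rintro ⟨p, hp, hc⟩
    exact ⟨p, hp, by rw [PySem.Set.contains_iff, PySem.Set.mem_ofList]; exact hc⟩

lemma exists_bridge (a b : List Int) :
    (∃ i' j' : Nat, 1 ≤ i' ∧ 1 ≤ j' ∧ i' ≤ a.length ∧ j' ≤ b.length ∧ 2 ≤ Lsuf a b i' j')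
    ↔ ∃ p : Int × Int, p ∈ b.zip b.tail ∧ p ∈ a.zip a.tail := by
  constructor
  · rintro ⟨i', j', u1, u2, u3, u4, u5⟩
    rw [two_le_Lsuf] at u5
    obtain ⟨iA, jB, rfl, rfl, e1, e0⟩ := u5
    refine ⟨(b.getD jB 0, b.getD (jB+1) 0), ?_, ?_⟩
    · rw [mem_zip_tail]; exact ⟨jB, by omega, rfl, rfl⟩
    · rw [mem_zip_tail]; exact ⟨iA, by omega, e0, e1⟩
  · rintro ⟨p, hb, ha⟩
    rw [mem_zip_tail] at hb ha
    obtain ⟨jB, hj, b1, b2⟩ := hb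
    obtain ⟨iA, hi2, a1, a2⟩ := ha
    exact ⟨iA+2, jB+2, by omega, by omega, by omega, by omega,
      (two_le_Lsuf a b _ _).mpr ⟨iA, jB, rfl, rfl, by rw [a2, b2], by rw [a1, b1]⟩⟩

-- ===== VERDICT (by name: the statement is the Claim_ definition above) =====
theorem compare_signature_sequences_py_spec : Claim_equal_compare_signature_sequences_py := by
  intro a b _
  unfold Spec_compare_signature_sequences_py
  have h := (A_char a b).trans ((exists_bridge a b).trans (B_char a b).symm)
  exact Bool.coe_iff_coe.mp h
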